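-- pv_equiv track=rewrite | github.com/jangandsim/Python | reverseInverse.py | reverseInverse
-- ===== SOURCE A (Python) =====
-- def reverseInverse(s):
--     t = []
--     i = 0
--     while (i < len(s) and not s[i].isalpha()) and not s[i].isnumeric():
--         i = i + 1
--     j = i
--     while (j < len(s) and (s[j].isalpha() or s[j].isnumeric())):
--         if s[j].isupper():
--             t.append(j)
--         j = j + 1
--     if j == len(s):
--         return s[0:j]
--     g = s[0:i] + s[i:j][::-1]
--     g = g.upper()
--     for y in t:
--         g = g[:y] + g[y].lower() + g[y + 1:]
--     return g+ reverseInverse(s[j:len(s)])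
-- ===== SOURCE B (Python) =====
-- def reverseInverse(s):
--     out = []
--     rest = s
--     while True:
--         i = 0
--         while i < len(rest) and not (rest[i].isalpha() or rest[i].isdigit()):
--             i += 1
--         j = i
--         while j < len(rest) and (rest[j].isalpha() or rest[j].isdigit()):
--             j += 1
--         if j == len(rest):
--             out.append(rest)
--             return ''.join(out)
--         piece = rest[:i] + ''.join(
--             c.lower() if rest[i + k].isupper() else c.upper()
--             for k, c in enumerate(rest[i:j][::-1]))
--         out.append(piece)
--         rest = rest[j:]
-- ===== Notes on version B (the rewrite author's own statement) =====
-- stated objective: alternative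
-- what changed: A's tail recursion on the remaining string becomes an explicit loop with an output accumulator, and A's recasing (uppercase the whole gap+reversed-run copy, record the uppercase positions in a list, then re-patch each listed position by slicing) is replaced by a single per-character pass over the reversed run that cases each slot directly on the original character's case.
import Mathlib
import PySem

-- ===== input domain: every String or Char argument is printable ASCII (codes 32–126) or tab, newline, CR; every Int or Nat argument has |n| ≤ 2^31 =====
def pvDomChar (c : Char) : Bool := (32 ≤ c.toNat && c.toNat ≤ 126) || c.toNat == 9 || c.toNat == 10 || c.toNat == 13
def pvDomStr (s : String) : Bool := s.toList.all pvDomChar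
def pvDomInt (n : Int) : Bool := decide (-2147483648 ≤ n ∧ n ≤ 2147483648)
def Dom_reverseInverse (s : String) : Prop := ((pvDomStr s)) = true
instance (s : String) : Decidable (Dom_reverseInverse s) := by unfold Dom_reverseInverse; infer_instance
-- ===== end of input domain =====

-- B replaces A's tail recursion by an iterative accumulator loop and A's
-- build-uppercased-copy-then-patch-listed-positions recasing by one per-character pass (objective: alternative).
-- Python's isnumeric coincides with isdigit on this ASCII domain; both ports use PySem.Chars.isdigit (exact on Dom).

-- ===== PORT A =====
-- `while (i < len(s) and not s[i].isalpha()) and not s[i].isnumeric(): i = i + 1`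
def pvSkipA (s : List Char) (i : Nat) : Nat :=
  if h : i < s.length then
    if !PySem.Chars.isalpha s[i] && !PySem.Chars.isdigit s[i] then pvSkipA s (i + 1) else i
  else i
termination_by s.length - i

-- `while j < len(s) and (s[j].isalpha() or s[j].isnumeric()): if s[j].isupper(): t.append(j); j = j + 1`
def pvRunA (s : List Char) (j : Nat) (t : List Nat) : Nat × List Nat :=
  if h : j < s.length then
    if PySem.Chars.isalpha s[j] || PySem.Chars.isdigit s[j] then
      pvRunA s (j + 1) (if PySem.Chars.isupper s[j] then t ++ [j] else t)
    else (j, t)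
  else (j, t)
termination_by s.length - j

def reverseInverseCore (fuel : Nat) (s : List Char) : List Char :=
  -- fuel only makes the recursion structural; it is never exhausted (each step consumes j ≥ 1 chars)
  match fuel with
  | 0 => []
  | fuel + 1 =>
    -- i = pvSkipA s 0 (the first while loop); (j, t) = pvRunA s i [] (the second)
    if (pvRunA s (pvSkipA s 0) []).1 = s.length then
      s.take (pvRunA s (pvSkipA s 0) []).1                      -- `if j == len(s): return s[0:j]`
    else
      -- `g = s[0:i] + s[i:j][::-1]; g = g.upper()`  (s[i:j] = (drop i).take (j-i), cf. PySem.List.slice_natCast)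
      -- `for y in t: g = g[:y] + g[y].lower() + g[y+1:]`  (y is always in range; g[y] read via getD)
      ((pvRunA s (pvSkipA s 0) []).2.foldl
          (fun g y => g.take y ++ [PySem.Chars.lowerChar (g.getD y ' ')] ++ g.drop (y + 1))
          (PySem.Chars.upper (s.take (pvSkipA s 0) ++
            ((s.drop (pvSkipA s 0)).take ((pvRunA s (pvSkipA s 0) []).1 - pvSkipA s 0)).reverse)))
        ++ reverseInverseCore fuel (s.drop (pvRunA s (pvSkipA s 0) []).1)   -- `return g + reverseInverse(s[j:len(s)])`

def reverseInverse (s : String) : String := String.ofList (reverseInverseCore (s.toList.length + 1) s.toList)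

-- ===== PORT B =====
-- `while i < len(rest) and not (rest[i].isalpha() or rest[i].isdigit()): i += 1`
def pvGapB (r : List Char) (i : Nat) : Nat :=
  if h : i < r.length then
    if !(PySem.Chars.isalpha r[i] || PySem.Chars.isdigit r[i]) then pvGapB r (i + 1) else i
  else i
termination_by r.length - i

-- `while j < len(rest) and (rest[j].isalpha() or rest[j].isdigit()): j += 1`
def pvRunEndB (r : List Char) (j : Nat) : Nat :=
  if h : j < r.length then
    if PySem.Chars.isalpha r[j] || PySem.Chars.isdigit r[j] then pvRunEndB r (j + 1) else j
  else j
termination_by r.length - j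

-- the generator expression: `c.lower() if rest[i+k].isupper() else c.upper() for k, c in enumerate(rest[i:j][::-1])`
-- (index i+k is always in range; rest[i+k] read via getD)
def pvPieceB (r : List Char) (i j : Nat) : List Char :=
  r.take i ++ (PySem.List.enumerate (((r.drop i).take (j - i)).reverse) 0).map
    (fun kc => if PySem.Chars.isupper (r.getD (i + kc.1.toNat) ' ')
               then PySem.Chars.lowerChar kc.2 else PySem.Chars.upperChar kc.2)

-- `while True:` loop; acc accumulates the emitted pieces (out, joined at the end)
def pvGoB (fuel : Nat) (acc : List Char) (r : List Char) : List Char :=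
  -- fuel only makes the loop structural; it is never exhausted (each pass consumes j ≥ 1 chars)
  match fuel with
  | 0 => acc
  | fuel + 1 =>
    -- i = pvGapB r 0; j = pvRunEndB r i
    if pvRunEndB r (pvGapB r 0) = r.length then
      acc ++ r                                                   -- `out.append(rest); return ''.join(out)`
    else
      pvGoB fuel (acc ++ pvPieceB r (pvGapB r 0) (pvRunEndB r (pvGapB r 0)))
            (r.drop (pvRunEndB r (pvGapB r 0)))                  -- `out.append(piece); rest = rest[j:]`

def reverseInverse_alt (s : String) : String := String.ofList (pvGoB (s.toList.length + 1) [] s.toList)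

-- ===== PRECONDITION & SPEC =====
def Spec_reverseInverse (s : String) (out : String) : Prop := out = reverseInverse_alt s
instance (s : String) (out : String) : Decidable (Spec_reverseInverse s out) := by unfold Spec_reverseInverse; infer_instance

-- ===== CLAIM (what is proved, stated in full; the proofs are below) =====
def Claim_equal_reverseInverse : Prop := ∀ (s : String), Dom_reverseInverse s → Spec_reverseInverse s (reverseInverse s)

-- ===== LEMMAS AND PROOFS =====

-- characterisation of the scans
theorem pvSkipA_le (s : List Char) (i : Nat) (h : i ≤ s.length) : pvSkipA s i ≤ s.length := by
  rw [pvSkipA]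
  split
  · split
    · exact pvSkipA_le s (i + 1) (by omega)
    · exact h
  · exact h
termination_by s.length - i

theorem pvRunA_fst_ge (s : List Char) (j : Nat) (t : List Nat) : j ≤ (pvRunA s j t).1 := by
  unfold pvRunA
  split
  · split
    · exact le_trans (Nat.le_succ j) (pvRunA_fst_ge s (j + 1) _)
    · exact le_refl j
  · exact le_refl j
termination_by s.length - j

theorem pvRunA_fst_le (s : List Char) (j : Nat) (t : List Nat) (h : j ≤ s.length) :
    (pvRunA s j t).1 ≤ s.length := by
  rw [pvRunA]
  split
  · split
    · next hlt _ => exact pvRunA_fst_le s (j + 1) _ hlt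
    · exact h
  · exact h
termination_by s.length - j

-- B's scans compute the same indices as A's scans
theorem pvGapB_eq (r : List Char) (i : Nat) : pvGapB r i = pvSkipA r i := by
  rw [pvGapB, pvSkipA]
  split
  · simp only [Bool.not_or]
    split
    · exact pvGapB_eq r (i + 1)
    · rfl
  · rfl
termination_by r.length - i

theorem pvRunEndB_eq (r : List Char) (j : Nat) (t : List Nat) : pvRunEndB r j = (pvRunA r j t).1 := by
  rw [pvRunEndB, pvRunA]
  split
  · split
    · exact pvRunEndB_eq r (j + 1) _
    · rfl
  · rfl
termination_by r.length - j


theorem pvSkipA_not_word (s : List Char) (i m : Nat) (h1 : i ≤ m) (h2 : m < pvSkipA s i) :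
    PySem.Chars.isalpha (s.getD m ' ') = false ∧ PySem.Chars.isdigit (s.getD m ' ') = false := by
  rw [pvSkipA] at h2
  split at h2
  · split at h2
    · next hlt hw =>
      rcases Nat.eq_or_lt_of_le h1 with rfl | h1'
      · simp only [List.getD_eq_getElem?_getD, List.getElem?_eq_getElem hlt, Option.getD_some]
        revert hw
        cases PySem.Chars.isalpha s[i] <;> cases PySem.Chars.isdigit s[i] <;> simp
      · exact pvSkipA_not_word s (i + 1) m h1' h2
    · omega
  · omega
termination_by s.length - i

theorem pvRunA_fst_indep (s : List Char) (j : Nat) (t : List Nat) :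
    (pvRunA s j t).1 = (pvRunA s j []).1 := by
  have h := pvRunEndB_eq s j t
  rw [pvRunEndB_eq s j []] at h
  omega

theorem pvRunA_snd_append (s : List Char) (j : Nat) (t : List Nat) :
    (pvRunA s j t).2 = t ++ (pvRunA s j []).2 := by
  rw [pvRunA, pvRunA]
  split
  · split
    · rw [pvRunA_snd_append s (j + 1),
          pvRunA_snd_append s (j + 1) (if PySem.Chars.isupper s[j] then [] ++ [j] else [])]
      split <;> simp
    · simp
  · simp
termination_by s.length - j

theorem pvRunA_mem_snd (s : List Char) (j : Nat) (y : Nat) :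
    y ∈ (pvRunA s j []).2 ↔
      j ≤ y ∧ y < (pvRunA s j []).1 ∧ y < s.length ∧ PySem.Chars.isupper (s.getD y ' ') = true := by
  rw [pvRunA]
  split
  · next hlt =>
    split
    · next hw =>
      rw [pvRunA_snd_append, pvRunA_fst_indep]
      constructor
      · intro hy
        rcases List.mem_append.1 hy with hy | hy
        · have hyj : y = j := by split at hy <;> simpa using hy
          subst hyj
          refine ⟨le_refl _, ?_, hlt, ?_⟩
          · have := pvRunA_fst_ge s (y + 1) ([] : List Nat)
            omega
          · split at hy
            · next hu =>
              simpa only [List.getD_eq_getElem?_getD, List.getElem?_eq_getElem hlt, Option.getD_some]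
                using hu
            · simp at hy
        · have hrec := (pvRunA_mem_snd s (j + 1) y).1 hy
          exact ⟨by omega, hrec.2.1, hrec.2.2⟩
      · rintro ⟨h1, h2, h3, h4⟩
        rcases Nat.eq_or_lt_of_le h1 with rfl | h1'
        · refine List.mem_append.2 (Or.inl ?_)
          have hu : PySem.Chars.isupper s[j] = true := by
            simpa only [List.getD_eq_getElem?_getD, List.getElem?_eq_getElem hlt, Option.getD_some]
              using h4
          simp [hu]
        · exact List.mem_append.2 (Or.inr ((pvRunA_mem_snd s (j + 1) y).2 ⟨h1', h2, h3, h4⟩))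
    · simp only [List.not_mem_nil, false_iff]
      rintro ⟨h1, h2, h3, h4⟩
      omega
  · simp only [List.not_mem_nil, false_iff]
    rintro ⟨h1, h2, h3, h4⟩
    omega
termination_by s.length - j

theorem pvRunA_snd_sorted (s : List Char) (j : Nat) : ((pvRunA s j []).2).Pairwise (· < ·) := by
  rw [pvRunA]
  split
  · split
    · rw [pvRunA_snd_append]
      refine List.pairwise_append.2 ⟨?_, pvRunA_snd_sorted s (j + 1), ?_⟩
      · split <;> simp
      · intro a ha b hb
        have hb' := (pvRunA_mem_snd s (j + 1) b).1 hb
        have ha' : a = j := by split at ha <;> simpa using ha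
        omega
    · simp
  · simp
termination_by s.length - j

-- ASCII case-mapping facts
theorem pvCharLe (a b : Char) : a ≤ b ↔ a.toNat ≤ b.toNat := by
  rw [Char.le_def, UInt32.le_iff_toNat_le]
  rfl

theorem upperChar_of_not_alpha (c : Char) (h : PySem.Chars.isalpha c = false) :
    PySem.Chars.upperChar c = c := by
  simp only [PySem.Chars.isalpha, Bool.or_eq_false_iff] at h
  simp [PySem.Chars.upperChar, h.2]

theorem lowerChar_upperChar (c : Char) :
    PySem.Chars.lowerChar (PySem.Chars.upperChar c) = PySem.Chars.lowerChar c := by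
  by_cases hl : PySem.Chars.islower c = true
  · have hb : 97 ≤ c.toNat ∧ c.toNat ≤ 122 := by
      simp only [PySem.Chars.islower, Bool.and_eq_true, decide_eq_true_eq, pvCharLe] at hl
      have ha : Char.toNat 'a' = 97 := by decide
      have hz : Char.toNat 'z' = 122 := by decide
      omega
    have hval : (c.toNat - 32).isValidChar := Or.inl (by omega)
    have hval' : c.toNat.isValidChar := Or.inl (by omega)
    have hd : (Char.ofNat (c.toNat - 32)).toNat = c.toNat - 32 := by
      rw [Char.toNat_ofNat, if_pos hval]
    have hcc : Char.ofNat c.toNat = c := by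
      apply Char.ext
      rw [Char.val_ofNat hval', Char.ofNat_toNat_eq_val]
    have hup : PySem.Chars.isupper (Char.ofNat (c.toNat - 32)) = true := by
      simp only [PySem.Chars.isupper, Bool.and_eq_true, decide_eq_true_eq, pvCharLe, hd]
      have hA : Char.toNat 'A' = 65 := by decide
      have hZ : Char.toNat 'Z' = 90 := by decide
      omega
    have hnotup : PySem.Chars.isupper c = false := by
      simp only [PySem.Chars.isupper, Bool.and_eq_true, decide_eq_true_eq, pvCharLe]
      have hA : Char.toNat 'A' = 65 := by decide
      have hZ : Char.toNat 'Z' = 90 := by decide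
      simp only [Bool.and_eq_false_iff, decide_eq_false_iff_not, pvCharLe]
      right
      omega
    rw [PySem.Chars.upperChar, if_pos hl]
    rw [PySem.Chars.lowerChar, if_pos hup, PySem.Chars.lowerChar, hnotup]
    simp only [Bool.false_eq_true, if_false]
    rw [hd]
    have : c.toNat - 32 + 32 = c.toNat := by omega
    rw [this, hcc]
  · rw [PySem.Chars.upperChar, if_neg hl]

-- one patch step `g[:y] + g[y].lower() + g[y+1:]` is a List.set
theorem patch_eq_set (g : List Char) (y : Nat) (h : y < g.length) :
    g.take y ++ [PySem.Chars.lowerChar (g.getD y ' ')] ++ g.drop (y + 1)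
      = g.set y (PySem.Chars.lowerChar g[y]) := by
  rw [List.set_eq_take_cons_drop _ h]
  simp [List.getD_eq_getElem?_getD, List.getElem?_eq_getElem h]

-- the recasing loop, pointwise
theorem recase_getElem? (t : List Nat) (g : List Char) (hb : ∀ y ∈ t, y < g.length)
    (hn : t.Nodup) (m : Nat) :
    (t.foldl (fun g y => g.take y ++ [PySem.Chars.lowerChar (g.getD y ' ')] ++ g.drop (y + 1)) g)[m]?
      = if m ∈ t then (g[m]?).map PySem.Chars.lowerChar else g[m]? := by
  induction t generalizing g with
  | nil => simp
  | cons y t ih =>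
    have hy : y < g.length := hb y List.mem_cons_self
    have hny : y ∉ t := (List.nodup_cons.1 hn).1
    simp only [List.foldl_cons]
    rw [patch_eq_set g y hy]
    rw [ih (g.set y (PySem.Chars.lowerChar g[y]))
        (by intro z hz; rw [List.length_set]; exact hb z (List.mem_cons_of_mem _ hz))
        (List.nodup_cons.1 hn).2 ]
    by_cases hm : m ∈ t
    · have hne : y ≠ m := fun e => hny (e ▸ hm)
      rw [if_pos hm, if_pos (List.mem_cons_of_mem _ hm), List.getElem?_set_ne hne]
    · by_cases hmy : m = y
      · subst hmy
        rw [if_neg hm, if_pos List.mem_cons_self, List.getElem?_set_self hy,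
            List.getElem?_eq_getElem hy]
        rfl
      · rw [if_neg hm, if_neg (by simp [hm, hmy]), List.getElem?_set_ne (fun e => hmy e.symm)]

-- the two pieces agree
theorem piece_eq (s : List Char) (h : (pvRunA s (pvSkipA s 0) []).1 ≠ s.length) :
    pvPieceB s (pvSkipA s 0) (pvRunA s (pvSkipA s 0) []).1
      = ((pvRunA s (pvSkipA s 0) []).2).foldl
          (fun g y => g.take y ++ [PySem.Chars.lowerChar (g.getD y ' ')] ++ g.drop (y + 1))
          (PySem.Chars.upper (s.take (pvSkipA s 0) ++
            ((s.drop (pvSkipA s 0)).take ((pvRunA s (pvSkipA s 0) []).1 - pvSkipA s 0)).reverse)) := by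
  have hle0 : pvSkipA s 0 ≤ s.length := pvSkipA_le s 0 (Nat.zero_le _)
  have hij : pvSkipA s 0 ≤ (pvRunA s (pvSkipA s 0) []).1 := pvRunA_fst_ge _ _ _
  have hjle : (pvRunA s (pvSkipA s 0) []).1 ≤ s.length := pvRunA_fst_le _ _ _ hle0
  have hmem := pvRunA_mem_snd s (pvSkipA s 0)
  have hnw : ∀ m, m < pvSkipA s 0 → PySem.Chars.isalpha (s.getD m ' ') = false :=
    fun m hm => (pvSkipA_not_word s 0 m (Nat.zero_le _) hm).1
  have hnd : ((pvRunA s (pvSkipA s 0) []).2).Nodup :=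
    (pvRunA_snd_sorted s _).imp (fun h => Nat.ne_of_lt h)
  generalize hI : pvSkipA s 0 = i at *
  generalize hJ : (pvRunA s i []).1 = j at *
  generalize hT : (pvRunA s i []).2 = t at *
  have hil : i ≤ s.length := le_trans hij hjle
  have hti : (s.take i).length = i := by simp [hil]
  have hrun : (((s.drop i).take (j - i)).reverse).length = j - i := by
    simp only [List.length_reverse, List.length_take, List.length_drop]
    omega
  have hglen : (PySem.Chars.upper (s.take i ++ ((s.drop i).take (j - i)).reverse)).length = j := by
    simp only [PySem.Chars.upper, List.length_map, List.length_append, hti, hrun]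
    omega
  have hb : ∀ y ∈ t, y < (PySem.Chars.upper (s.take i ++ ((s.drop i).take (j - i)).reverse)).length := by
    intro y hy
    rw [hglen]
    exact ((hmem y).1 hy).2.1
  apply List.ext_getElem?
  intro m
  rw [recase_getElem? t _ hb hnd m]
  unfold pvPieceB
  by_cases hm1 : m < i
  · have hmt : m ∉ t := fun hc => by have := (hmem m).1 hc; omega
    have hmlen : m < s.length := by omega
    rw [if_neg hmt,
        List.getElem?_append_left (by rw [hti]; exact hm1),
        PySem.Chars.upper, List.getElem?_map,
        List.getElem?_append_left (by rw [hti]; exact hm1),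
        List.getElem?_take_of_lt hm1,
        List.getElem?_eq_getElem hmlen]
    have hna : PySem.Chars.isalpha s[m] = false := by
      have := hnw m hm1
      simpa only [List.getD_eq_getElem?_getD, List.getElem?_eq_getElem hmlen, Option.getD_some]
        using this
    simp [upperChar_of_not_alpha _ hna]
  · push_neg at hm1
    by_cases hm2 : m < j
    · have hmlen : m < s.length := by omega
      have hk : m - i < (((s.drop i).take (j - i)).reverse).length := by rw [hrun]; omega
      rw [List.getElem?_append_right (by rw [hti]; exact hm1), hti,
          List.getElem?_map, PySem.List.getElem?_enumerate,
          List.getElem?_eq_getElem hk,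
          PySem.Chars.upper, List.getElem?_map,
          List.getElem?_append_right (by rw [hti]; exact hm1), hti,
          List.getElem?_eq_getElem hk]
      have him : i + (m - i) = m := by omega
      by_cases hu : PySem.Chars.isupper (s.getD m ' ') = true
      · have hmt : m ∈ t := (hmem m).2 ⟨hm1, hm2, hmlen, hu⟩
        rw [if_pos hmt]
        simp only [Option.map_some, Option.some.injEq, zero_add, Int.toNat_natCast, him]
        rw [if_pos hu, lowerChar_upperChar]
      · have hmt : m ∉ t := fun hc => hu ((hmem m).1 hc).2.2.2
        rw [if_neg hmt]
        simp only [Option.map_some, Option.some.injEq, zero_add, Int.toNat_natCast, him]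
        rw [if_neg hu]
    · push_neg at hm2
      have hmt : m ∉ t := fun hc => by have := (hmem m).1 hc; omega
      rw [if_neg hmt]
      rw [List.getElem?_eq_none (by simp only [List.length_append, List.length_map,
            PySem.List.length_enumerate, hti, hrun]; omega),
          List.getElem?_eq_none (by rw [hglen]; exact hm2)]

-- the iterative loop equals the recursion, with the accumulator in front
theorem pvGoB_eq (fuel : Nat) (acc : List Char) (r : List Char) :
    pvGoB fuel acc r = acc ++ reverseInverseCore fuel r := by
  induction fuel generalizing acc r with
  | zero => simp [pvGoB, reverseInverseCore]
  | succ fuel ih =>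
    rw [pvGoB, reverseInverseCore]
    rw [pvGapB_eq, pvRunEndB_eq r _ ([] : List Nat)]
    by_cases hc : (pvRunA r (pvSkipA r 0) []).1 = r.length
    · rw [if_pos hc, if_pos hc, hc, List.take_length]
    · rw [if_neg hc, if_neg hc, ih, piece_eq r hc, List.append_assoc]

-- ===== VERDICT (by name: the statement is the Claim_ definition above) =====
theorem reverseInverse_spec : Claim_equal_reverseInverse := by
  intro s _
  unfold Spec_reverseInverse reverseInverse reverseInverse_alt
  rw [pvGoB_eq, List.nil_append]
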